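-- pv_equiv track=rewrite | github.com/dsweet99/dryer | test/benchmark_data/module_008.py | compute_8_10
-- ===== SOURCE A (Python) =====
-- def compute_8_10(a, b, c):
--     x = a * 167 + b * 176
--     y = c * 141 - a * 170
--     for i in range(23):
--         x = x + i * 35
--         y = y - i * 29
--         if x > 5900:
--             x = x % 1450
--     return x + y + 81
-- ===== SOURCE B (Python) =====
-- def compute_8_10(a, b, c):
--     # y never depends on x: y + 81 folds to c*141 - a*170 - 7256;
--     # x's path-dependent loop is done by tail recursion on i.
--     def step(x, i):
--         if i >= 23:
--             return x
--         x += i * 35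
--         if x > 5900:
--             x %= 1450
--         return step(x, i + 1)
--     return step(a * 167 + b * 176, 0) + c * 141 - a * 170 - 7256
-- ===== Notes on version B (the rewrite author's own statement) =====
-- stated objective: simpler
-- what changed: y's iterative accumulation is replaced by the closed form c*141 - a*170 - 7256 (folding in the +81), and x's conditional-modulo loop becomes a tail-recursive helper over the index instead of a paired two-accumulator loop
import Mathlib
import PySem

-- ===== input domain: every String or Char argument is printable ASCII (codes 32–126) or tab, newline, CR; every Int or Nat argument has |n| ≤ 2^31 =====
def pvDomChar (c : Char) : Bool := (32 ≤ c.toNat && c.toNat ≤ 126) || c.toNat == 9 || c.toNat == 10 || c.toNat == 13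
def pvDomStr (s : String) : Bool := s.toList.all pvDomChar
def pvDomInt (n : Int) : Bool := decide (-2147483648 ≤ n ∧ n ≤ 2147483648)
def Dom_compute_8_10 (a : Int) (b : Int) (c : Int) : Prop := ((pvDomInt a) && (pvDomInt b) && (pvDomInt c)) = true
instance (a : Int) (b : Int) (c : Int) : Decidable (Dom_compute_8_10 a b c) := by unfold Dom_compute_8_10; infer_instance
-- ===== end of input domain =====

-- B folds y's accumulation and the +81 into the closed form c*141 - a*170 - 7256 and runs x's loop as a tail-recursive helper (objective: simpler).


-- ===== PORT A =====
def compute_8_10 (a : Int) (b : Int) (c : Int) : Int :=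
  let x := a * 167 + b * 176
  let y := c * 141 - a * 170
  let s := (PySem.List.pyRange 0 23 1).foldl
    (fun (p : Int × Int) i =>
      let x := p.1 + i * 35
      let y := p.2 - i * 29
      (if x > 5900 then PySem.Int.mod x 1450 else x, y)) (x, y)
  s.1 + s.2 + 81

-- ===== PORT B =====
-- tail-recursive helper 'step' of Source B
def pvStep (x : Int) (i : Nat) : Int :=
  if i ≥ 23 then x
  else
    let x := x + (i : Int) * 35
    pvStep (if x > 5900 then PySem.Int.mod x 1450 else x) (i + 1)
termination_by 23 - i

def compute_8_10_alt (a : Int) (b : Int) (c : Int) : Int :=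
  pvStep (a * 167 + b * 176) 0 + c * 141 - a * 170 - 7256

-- ===== PRECONDITION & SPEC =====
def Spec_compute_8_10 (a : Int) (b : Int) (c : Int) (out : Int) : Prop := out = compute_8_10_alt a b c
instance (a : Int) (b : Int) (c : Int) (out : Int) : Decidable (Spec_compute_8_10 a b c out) := by unfold Spec_compute_8_10; infer_instance

-- ===== CLAIM =====
def Claim_equal_compute_8_10 : Prop := ∀ (a : Int) (b : Int) (c : Int), Dom_compute_8_10 a b c → Spec_compute_8_10 a b c (compute_8_10 a b c)

-- ===== LEMMAS AND PROOFS =====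

-- A's paired fold splits: the first component is an x-only fold, the second is y minus 29 * sum of the list.
theorem pv_fold_split (l : List Int) (x y : Int) :
    l.foldl (fun (p : Int × Int) i =>
      let x := p.1 + i * 35
      let y := p.2 - i * 29
      (if x > 5900 then PySem.Int.mod x 1450 else x, y)) (x, y)
    = (l.foldl (fun x i =>
        let x := x + i * 35
        if x > 5900 then PySem.Int.mod x 1450 else x) x,
       y - 29 * l.sum) := by
  induction l generalizing x y with
  | nil => simp
  | cons h t ih =>
      simp only [List.foldl_cons, List.sum_cons, ih]
      refine Prod.ext rfl ?_
      ring

-- the x-only fold over the remaining range equals B's tail recursion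
theorem pv_fold_eq_step (i : Nat) (hi : i ≤ 23) (x : Int) :
    (PySem.List.pyRange (i : Int) 23 1).foldl (fun x j =>
        let x := x + j * 35
        if x > 5900 then PySem.Int.mod x 1450 else x) x = pvStep x i := by
  induction hn : 23 - i generalizing i x with
  | zero =>
      have : i = 23 := by omega
      subst this
      rw [pvStep]
      simp
  | succ n ih =>
      have hlt : (i : Int) < 23 := by exact_mod_cast (by omega : i < 23)
      rw [PySem.List.pyRange_one_cons hlt, List.foldl_cons, pvStep]
      have h1 : ((i : Int) + 1) = ((i + 1 : Nat) : Int) := by push_cast; ring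
      rw [h1, ih (i + 1) (by omega) _ (by omega)]
      simp [show ¬ i ≥ 23 by omega]

-- ===== VERDICT =====
theorem compute_8_10_spec : Claim_equal_compute_8_10 := by
  intro a b c _
  unfold Spec_compute_8_10 compute_8_10 compute_8_10_alt
  simp only [pv_fold_split]
  rw [show (PySem.List.pyRange 0 23 1) = (PySem.List.pyRange ((0:Nat):Int) 23 1) from rfl,
      pv_fold_eq_step 0 (by omega)]
  have hs : (PySem.List.pyRange (((0:Nat)):Int) 23 1).sum = 253 := by decide
  rw [hs]
  ring
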